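-- pv_equiv track=rewrite | github.com/Rishabh5903/Competitive_Programming | Codeforces/Extra practice/1884a.py | check
-- ===== SOURCE A (Python) =====
-- def check(x,k):
--     num=0
--     while(x):
--         num+=x%10
--         x//=10
--     if(num%k==0):
--         return 1
--     else:
--         return 0
-- ===== SOURCE B (Python) =====
-- def check(x, k):
--     s = sum(int(ch) for ch in str(x))
--     return 1 if s % k == 0 else 0
-- ===== Notes on version B (the rewrite author's own statement) =====
-- stated objective: idiomatic
-- what changed: Replaces the divmod while-loop (running quotient and accumulator) with summing the digit characters of the decimal string representation, the way an experienced Python developer would write a digit sum.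
import Mathlib
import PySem

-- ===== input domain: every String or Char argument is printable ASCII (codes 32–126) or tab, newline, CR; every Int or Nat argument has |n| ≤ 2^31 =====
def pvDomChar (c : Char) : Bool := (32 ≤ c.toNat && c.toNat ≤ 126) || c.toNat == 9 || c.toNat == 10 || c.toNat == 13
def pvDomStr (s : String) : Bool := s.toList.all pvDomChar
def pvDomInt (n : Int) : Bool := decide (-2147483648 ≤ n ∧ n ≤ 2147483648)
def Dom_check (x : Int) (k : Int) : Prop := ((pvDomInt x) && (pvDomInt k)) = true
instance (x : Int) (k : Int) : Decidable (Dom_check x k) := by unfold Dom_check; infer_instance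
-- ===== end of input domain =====

-- B replaces A's divmod while-loop with summing the digit characters of str(x): idiomatic, same cost.

-- ===== PORT A =====
-- A's while-loop: num += x % 10; x //= 10.  Fuel x.natAbs + 1 covers every x ≥ 0
-- (the loop runs at most as many times as x has digits, ≤ x + 1); for x < 0 the
-- Python loop never terminates, which Pre_check excludes.
def checkLoop : Nat → Int → Int → Int
  | 0, _, num => num
  | fuel + 1, x, num =>
      if x = 0 then num
      else checkLoop fuel (PySem.Int.floordiv x 10) (num + PySem.Int.mod x 10)

def check (x : Int) (k : Int) : Int :=
  let num := checkLoop (x.natAbs + 1) x 0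
  if PySem.Int.mod num k = 0 then 1 else 0

-- ===== PORT B =====
-- int(ch) for a single character; `.getD 0` only totalizes the ValueError case,
-- which never occurs on Pre_check (str(x) of x ≥ 0 is all digit characters).
def charInt (c : Char) : Int := (PySem.Int.ofChars? [c]).getD 0

def check_alt (x : Int) (k : Int) : Int :=
  let s : Int := ((PySem.Int.toChars x).map charInt).sum
  if PySem.Int.mod s k = 0 then 1 else 0

-- ===== PRECONDITION & SPEC =====
-- Pre_check is exactly where the Python A returns: for x < 0 A's while-loop never
-- terminates (x //= 10 stalls at -1), and for k = 0 A raises ZeroDivisionError.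
def Pre_check (x : Int) (k : Int) : Prop := 0 ≤ x ∧ k ≠ 0
instance (x : Int) (k : Int) : Decidable (Pre_check x k) := by unfold Pre_check; infer_instance
def pvWitness_check : Int × Int := (1884, 7)

def Spec_check (x : Int) (k : Int) (out : Int) : Prop := out = check_alt x k
instance (x : Int) (k : Int) (out : Int) : Decidable (Spec_check x k out) := by unfold Spec_check; infer_instance

-- ===== CLAIM (what is proved, stated in full; the proofs are below) =====
def Claim_equal_check : Prop := ∀ (x : Int) (k : Int), Dom_check x k → Pre_check x k → Spec_check x k (check x k)

-- ===== LEMMAS AND PROOFS =====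

-- digit sum of a natural number, the common value both ports compute
def dsum (n : Nat) : Nat :=
  if h : n = 0 then 0 else n % 10 + dsum (n / 10)
  decreasing_by exact Nat.div_lt_self (Nat.pos_of_ne_zero h) (by norm_num)

lemma charInt_digitChar (d : Nat) (hd : d < 10) : charInt (Nat.digitChar d) = (d : Int) := by
  interval_cases d <;> decide

lemma toDigitsCore_sum (fuel : Nat) :
    ∀ (n : Nat) (acc : List Char), n < fuel →
      ((Nat.toDigitsCore 10 fuel n acc).map charInt).sum
        = (dsum n : Int) + (acc.map charInt).sum := by
  induction fuel with
  | zero => intro n acc h; omega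
  | succ f ih =>
    intro n acc h
    rw [Nat.toDigitsCore]
    by_cases h0 : n / 10 = 0
    · simp only [h0, if_true]
      simp only [List.map_cons, List.sum_cons]
      rw [charInt_digitChar _ (Nat.mod_lt _ (by norm_num))]
      by_cases hn : n = 0
      · subst hn; rw [dsum]; simp
      · rw [dsum]; simp only [hn, dif_neg, not_false_iff]
        rw [h0, dsum]; push_cast; ring
    · rw [if_neg h0]
      rw [ih (n / 10) _ (by omega)]
      simp only [List.map_cons, List.sum_cons]
      rw [charInt_digitChar _ (Nat.mod_lt _ (by norm_num))]
      conv_rhs => rw [dsum]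
      have hn : n ≠ 0 := by omega
      simp only [hn, dif_neg, not_false_iff]
      push_cast; ring

lemma checkLoop_eq (fuel : Nat) :
    ∀ (x num : Int), 0 ≤ x → x < (fuel : Int) →
      checkLoop fuel x num = num + (dsum x.toNat : Int) := by
  induction fuel with
  | zero => intro x num hx h; omega
  | succ f ih =>
    intro x num hx h
    rw [checkLoop]
    by_cases h0 : x = 0
    · subst h0; simp [dsum]
    · rw [if_neg h0]
      have hxpos : 0 < x := lt_of_le_of_ne hx (Ne.symm h0)
      have hfd : PySem.Int.floordiv x 10 = x / 10 := by
        simp only [PySem.Int.floordiv]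
        rw [Int.fdiv_eq_ediv]; norm_num
      have hmod : PySem.Int.mod x 10 = x % 10 := by
        simp only [PySem.Int.mod]
        rw [Int.fmod_eq_emod]; norm_num
      rw [hfd, hmod]
      have hdiv_nonneg : 0 ≤ x / 10 := Int.ediv_nonneg hx (by norm_num)
      have hdiv_lt : x / 10 < (f : Int) := by
        have : x / 10 < x := by
          have := Int.ediv_le_self 10 hx
          omega
        omega
      rw [ih _ _ hdiv_nonneg hdiv_lt]
      have hx10 : (x / 10).toNat = x.toNat / 10 := by omega
      conv_rhs => rw [dsum]
      have hxt : x.toNat ≠ 0 := by omega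
      simp only [hxt, dif_neg, not_false_iff]
      have hm : x % 10 = ((x.toNat % 10 : Nat) : Int) := by omega
      rw [hx10, hm]; push_cast; ring

lemma digitSum_agree (x : Int) (hx : 0 ≤ x) :
    checkLoop (x.natAbs + 1) x 0 = ((PySem.Int.toChars x).map charInt).sum := by
  have h1 : checkLoop (x.natAbs + 1) x 0 = (dsum x.toNat : Int) := by
    rw [checkLoop_eq _ _ _ hx (by omega)]; ring
  have h2 : PySem.Int.toChars x = Nat.toDigits 10 x.toNat := by
    simp [PySem.Int.toChars, not_lt.mpr hx]
  rw [h1, h2, Nat.toDigits, toDigitsCore_sum _ _ _ (by omega)]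
  simp

-- ===== VERDICT (by name: the statement is the Claim_ definition above) =====
theorem check_spec : Claim_equal_check := by
  intro x k _ hpre
  unfold Spec_check check check_alt
  rw [digitSum_agree x hpre.1]
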